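-- pv_equiv track=rewrite | github.com/k-harada/AtCoder | Recommend/tenka1_2013_qualA_C.py | solve
-- ===== SOURCE A (Python) =====
-- def solve(m, n):
--     """
--     斜めに同じ数字が並ぶしかない
--     m + n - 1個を問題なく１行に並べる方法をdpで出す
--     長くなったら結局4周期で同じの続くからカット
--     min(m, n) == 1 の時はそれでいい
--     そうじゃない時は斜めのとり方が２通り
--
--     あとはmax(m, n) <= 3のときはその限りじゃないので個別にケア
--     例えば
--     1 2 3
--     3 1 2
--     2 3 1
--     とか、１行にすると2 3 1 2 3で違反になりそうで違反してない
--     """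
--     if m > 8:
--         m = (m - 8) % 4 + 8
--     if n > 8:
--         n = (n - 8) % 4 + 8
--     r = m + n - 1
--     key_list = [
--         "000", "001", "002", "003", "012", "013", "021", "023", "031", "032",
--         "121", "123", "131", "132", "213", "231", "312", "321"
--     ]
--
--     p = len(key_list)
--     key_dict = dict()
--     for i in range(p):
--         key_dict[key_list[i]] = i
--
--     edge_list = []
--     # 1
--     for k in range(p):
--         key_k = key_list[k]
--         if key_k[-1] == "1":
--             continue
--         key_s = key_k[1:] + "1"
--         s = key_dict[key_s]
--         edge_list.append((k, s))
--     # 2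
--     for k in range(p):
--         key_k = key_list[k]
--         if "2" in key_k[-2:]:
--             continue
--         key_s = key_k[1:] + "2"
--         s = key_dict[key_s]
--         edge_list.append((k, s))
--     # 3
--     for k in range(p):
--         key_k = key_list[k]
--         if "3" in key_k:
--             continue
--         key_s = key_k[1:] + "3"
--         s = key_dict[key_s]
--         edge_list.append((k, s))
--
--     dp = [[0] * p for _ in range(2)]
--     dp[0][0] = 1
--
--     for i in range(r):
--         for k in range(p):
--             dp[(i + 1) % 2][k] = 0
--         for k, s in edge_list:
--             dp[(i + 1) % 2][s] += dp[i % 2][k]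
--     if min(m, n) == 1:
--         return sum(dp[r % 2])
--     elif m == 2 and n == 2:
--         return 18
--     elif m == 2 and n == 3:
--         return 20
--     elif m == 3 and n == 2:
--         return 20
--     elif m == 3 and n == 3:
--         return 28
--     else:
--         return 2 * sum(dp[r % 2])
-- ===== SOURCE B (Python) =====
-- def solve(m, n):
--     # Top-down memoized recursion over the 3-char window states instead of a
--     # rolling bottom-up DP table with a precomputed edge list; restricted to
--     # grid sizes m, n >= 1 (the problem's natural domain).
--     if m > 8:
--         m = (m - 8) % 4 + 8
--     if n > 8:
--         n = (n - 8) % 4 + 8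
--     r = m + n - 1
--
--     memo = {}
--
--     def walks(t, win):
--         if t == 0:
--             return 1
--         key = (t, win)
--         if key in memo:
--             return memo[key]
--         total = 0
--         if win[-1] != "1":
--             total += walks(t - 1, win[1:] + "1")
--         if "2" not in win[-2:]:
--             total += walks(t - 1, win[1:] + "2")
--         if "3" not in win:
--             total += walks(t - 1, win[1:] + "3")
--         memo[key] = total
--         return total
--
--     total = walks(r, "000")
--     if min(m, n) == 1:
--         return total
--     elif m == 2 and n == 2:
--         return 18
--     elif (m, n) in ((2, 3), (3, 2)):
--         return 20
--     elif m == 3 and n == 3: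
--         return 28
--     else:
--         return 2 * total
-- ===== Notes on version B (the rewrite author's own statement) =====
-- stated objective: alternative
-- what changed: Replaces the bottom-up rolling two-row DP table with a precomputed key_dict/edge_list by a top-down memoized recursion walks(remaining, window) that generates valid successor windows on the fly from the 3-char window; capping, r = m+n-1 and the special-case branch table are kept.
-- outside the precondition, e.g. on solve(0, 0): A returns 0, B raises RecursionError; on solve(-2, 1): A returns 2, B raises RecursionError
import Mathlib
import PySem

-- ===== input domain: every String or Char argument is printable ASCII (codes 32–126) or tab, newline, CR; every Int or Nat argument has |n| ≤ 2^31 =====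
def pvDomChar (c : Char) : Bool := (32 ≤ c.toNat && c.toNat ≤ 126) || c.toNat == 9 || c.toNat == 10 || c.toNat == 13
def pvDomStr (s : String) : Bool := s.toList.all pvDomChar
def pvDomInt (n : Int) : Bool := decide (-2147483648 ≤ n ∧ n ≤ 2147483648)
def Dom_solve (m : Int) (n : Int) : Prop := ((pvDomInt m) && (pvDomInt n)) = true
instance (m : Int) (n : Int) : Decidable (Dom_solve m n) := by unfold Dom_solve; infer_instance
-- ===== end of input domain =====

-- B replaces A's rolling two-row DP table with a precomputed edge list by a top-down
-- memoized recursion on the 3-char window, generating successors on the fly (objective: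
-- alternative decomposition, same cost).

-- ===== PORT A =====
-- Python strings are ported as their character lists (PySem.Chars domain; all ASCII digits).
-- the two capping lines shared verbatim by A and B ('if x > 8: x = (x - 8) % 4 + 8')
def pvCap (x : Int) : Int := if 8 < x then PySem.Int.mod (x - 8) 4 + 8 else x

def pvKeyList : List (List Char) :=
  [['0','0','0'], ['0','0','1'], ['0','0','2'], ['0','0','3'], ['0','1','2'], ['0','1','3'],
   ['0','2','1'], ['0','2','3'], ['0','3','1'], ['0','3','2'],
   ['1','2','1'], ['1','2','3'], ['1','3','1'], ['1','3','2'], ['2','1','3'], ['2','3','1'],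
   ['3','1','2'], ['3','2','1']]

-- dp[i][k] read / write; pyGetD/pySetD are the total forms, exact for the in-range
-- nonnegative indices the ports use
def pvGet2 (dp : List (List Int)) (i k : Int) : Int :=
  PySem.List.pyGetD (PySem.List.pyGetD dp i []) k 0

def pvSet2 (dp : List (List Int)) (i k : Int) (v : Int) : List (List Int) :=
  PySem.List.pySetD dp i (PySem.List.pySetD (PySem.List.pyGetD dp i []) k v)

-- everything of A after the capping: key_dict, edge_list, the rolling DP and sum(dp[r % 2])
-- (A reads m, n past the capping only through r = m + n - 1 and the final branch chain)
def pvTotalA (r : Int) : Int :=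
  let keyList := pvKeyList
  let p : Int := (keyList.length : Int)
  let keyDict : PySem.Dict (List Char) Int :=
    (PySem.List.pyRange 0 p 1).foldl
      (fun d i => d.insert (PySem.List.pyGetD keyList i []) i) PySem.Dict.empty
  let e1 : List (Int × Int) :=
    (PySem.List.pyRange 0 p 1).foldl (fun es k =>
      let keyK := PySem.List.pyGetD keyList k []
      if PySem.List.pyGet? keyK (-1) = some '1' then es
      else
        let keyS := PySem.List.slice keyK (some 1) none ++ ['1']
        es ++ [(k, keyDict.getD keyS 0)]) []
  let e2 : List (Int × Int) :=
    (PySem.List.pyRange 0 p 1).foldl (fun es k =>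
      let keyK := PySem.List.pyGetD keyList k []
      if PySem.Chars.isIn ['2'] (PySem.List.slice keyK (some (-2)) none) then es
      else
        let keyS := PySem.List.slice keyK (some 1) none ++ ['2']
        es ++ [(k, keyDict.getD keyS 0)]) e1
  let edgeList : List (Int × Int) :=
    (PySem.List.pyRange 0 p 1).foldl (fun es k =>
      let keyK := PySem.List.pyGetD keyList k []
      if PySem.Chars.isIn ['3'] keyK then es
      else
        let keyS := PySem.List.slice keyK (some 1) none ++ ['3']
        es ++ [(k, keyDict.getD keyS 0)]) e2
  let dp : List (List Int) :=
    (PySem.List.pyRange 0 2 1).map (fun _ => List.replicate p.toNat (0 : Int))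
  let dp := pvSet2 dp 0 0 1
  let dp := (PySem.List.pyRange 0 r 1).foldl (fun dp i =>
      let dp := (PySem.List.pyRange 0 p 1).foldl
        (fun dp k => pvSet2 dp (PySem.Int.mod (i + 1) 2) k 0) dp
      edgeList.foldl (fun dp e =>
        pvSet2 dp (PySem.Int.mod (i + 1) 2) e.2
          (pvGet2 dp (PySem.Int.mod (i + 1) 2) e.2 + pvGet2 dp (PySem.Int.mod i 2) e.1)) dp) dp
  (PySem.List.pyGetD dp (PySem.Int.mod r 2) []).sum

def solve (m : Int) (n : Int) : Int :=
  let m := pvCap m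
  let n := pvCap n
  let r := m + n - 1
  let tot := pvTotalA r
  if min m n = 1 then tot
  else if m = 2 ∧ n = 2 then 18
  else if m = 2 ∧ n = 3 then 20
  else if m = 3 ∧ n = 2 then 20
  else if m = 3 ∧ n = 3 then 28
  else 2 * tot

-- ===== PORT B =====
-- Source B's walks(t, win): memoized recursion, successors generated from the window on the fly.
-- Structural recursion on the Nat fuel t; the memo dict is threaded through (Python's
-- closure-captured `memo`), keys are the Python (t, win) pairs.
def pvWalks : Nat → List Char → PySem.Dict (Int × List Char) Int →
    Int × PySem.Dict (Int × List Char) Int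
  | 0, _, memo => (1, memo)
  | Nat.succ t, win, memo =>
    let key : Int × List Char := ((t : Int) + 1, win)
    match memo.get? key with
    | some v => (v, memo)
    | none =>
      let total : Int := 0
      let (total, memo) :=
        if PySem.List.pyGet? win (-1) ≠ some '1' then
          let (v, memo) := pvWalks t (PySem.List.slice win (some 1) none ++ ['1']) memo
          (total + v, memo)
        else (total, memo)
      let (total, memo) :=
        if ¬ (PySem.Chars.isIn ['2'] (PySem.List.slice win (some (-2)) none) = true) then
          let (v, memo) := pvWalks t (PySem.List.slice win (some 1) none ++ ['2']) memo
          (total + v, memo)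
        else (total, memo)
      let (total, memo) :=
        if ¬ (PySem.Chars.isIn ['3'] win = true) then
          let (v, memo) := pvWalks t (PySem.List.slice win (some 1) none ++ ['3']) memo
          (total + v, memo)
        else (total, memo)
      (total, memo.insert key total)

def solve_alt (m : Int) (n : Int) : Int :=
  let m := pvCap m
  let n := pvCap n
  let r := m + n - 1
  -- Source B's walks(r, "000") terminates only for r ≥ 0 (Pre_solve guarantees 1 ≤ r);
  -- the Nat fuel r.toNat is exact there (Source B hits the recursion limit for r < 0)
  let tot := (pvWalks r.toNat ['0','0','0'] PySem.Dict.empty).1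
  if min m n = 1 then tot
  else if m = 2 ∧ n = 2 then 18
  else if (m = 2 ∧ n = 3) ∨ (m = 3 ∧ n = 2) then 20
  else if m = 3 ∧ n = 3 then 28
  else 2 * tot

-- ===== PRECONDITION & SPEC =====
-- Pre_solve excludes the inputs whose CAPPED total m + n is below 1 (so r = m + n - 1 < 0,
-- never a grid): there A's loop body never runs and its answer (0 or 1 by the parity of r)
-- is an artefact of the two-row buffer, while B's recursion does not terminate
-- (RecursionError).  ('%' on Int is Lean's emod = Python's % for the positive divisor 4.)
def Pre_solve (m : Int) (n : Int) : Prop :=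
  1 ≤ (if 8 < m then (m - 8) % 4 + 8 else m) + (if 8 < n then (n - 8) % 4 + 8 else n)
instance (m : Int) (n : Int) : Decidable (Pre_solve m n) := by unfold Pre_solve; infer_instance

def pvWitness_solve : Int × Int := (3, 4)

def Spec_solve (m : Int) (n : Int) (out : Int) : Prop := out = solve_alt m n
instance (m : Int) (n : Int) (out : Int) : Decidable (Spec_solve m n out) := by unfold Spec_solve; infer_instance

-- ===== CLAIM (what is proved, stated in full; the proofs are below) =====
def Claim_equal_solve : Prop := ∀ (m : Int) (n : Int), Dom_solve m n → Pre_solve m n → Spec_solve m n (solve m n)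

-- ===== LEMMAS AND PROOFS =====

lemma pvCap_eq (x : Int) : pvCap x = if 8 < x then (x - 8) % 4 + 8 else x := by
  unfold pvCap
  split_ifs with h
  · rw [PySem.Int.mod_eq_emod_of_pos (by norm_num)]
  · rfl

lemma pvCap_le (x : Int) : pvCap x ≤ 11 := by
  rw [pvCap_eq]
  split_ifs with h
  · have := Int.emod_lt_of_pos (x - 8) (by norm_num : (0:Int) < 4)
    omega
  · omega

-- the two totals agree for every reachable r (capped m, n ≤ 11, so r ≤ 21)
set_option maxRecDepth 40000 in
set_option maxHeartbeats 2000000 in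
lemma pvTotal_eq (r : Int) (h0 : 0 ≤ r) (h1 : r ≤ 21) :
    pvTotalA r = (pvWalks r.toNat ['0','0','0'] PySem.Dict.empty).1 := by
  interval_cases r <;> decide

theorem solve_spec_aux (m n : Int) (hp : Pre_solve m n) : solve m n = solve_alt m n := by
  have hm := pvCap_le m
  have hn := pvCap_le n
  have hsum : 1 ≤ pvCap m + pvCap n := by
    unfold Pre_solve at hp
    rw [pvCap_eq, pvCap_eq]
    exact hp
  simp only [solve, solve_alt]
  rw [pvTotal_eq (pvCap m + pvCap n - 1) (by omega) (by omega)]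
  split_ifs <;> first | rfl | omega

-- ===== VERDICT (by name: the statement is the Claim_ definition above) =====
theorem solve_spec : Claim_equal_solve := by
  intro m n _ hp
  exact solve_spec_aux m n hp
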